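-- pv_equiv track=rewrite | github.com/UlisseWolf/BAT4Blender | source/LOD.py | get_min_max_xyz
-- ===== SOURCE A (Python) =====
-- from typing import List, Any
--
-- def get_min_max_xyz(b_boxes: List[List[Any]]) -> List[Any]:
--     v = b_boxes[0][0]
--     (min_x, max_x, min_y, max_y, min_z, max_z) = (v[0], v[0], v[1], v[1], v[2], v[2])
--     for b in b_boxes:
--         for v in b:
--             if v[0] < min_x:
--                 min_x = v[0]
--             if v[0] > max_x:
--                 max_x = v[0]
--             if v[1] < min_y:
--                 min_y = v[1]
--             if v[1] > max_y:
--                 max_y = v[1]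
--             if v[2] < min_z:
--                 min_z = v[2]
--             if v[2] > max_z:
--                 max_z = v[2]
--     return [min_x, max_x, min_y, max_y, min_z, max_z]
-- ===== SOURCE B (Python) =====
-- def get_min_max_xyz(b_boxes):
--     verts = [v for b in b_boxes for v in b]
--     xs = [v[0] for v in verts]
--     ys = [v[1] for v in verts]
--     zs = [v[2] for v in verts]
--     return [min(xs), max(xs), min(ys), max(ys), min(zs), max(zs)]
-- ===== Notes on version B (the rewrite author's own statement) =====
-- stated objective: idiomatic
-- what changed: Replaces the six-accumulator nested comparison loop by a build-then-reduce decomposition: flatten all vertices once, project the three coordinate lists, and let the min/max builtins do the reduction.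
import Mathlib
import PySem

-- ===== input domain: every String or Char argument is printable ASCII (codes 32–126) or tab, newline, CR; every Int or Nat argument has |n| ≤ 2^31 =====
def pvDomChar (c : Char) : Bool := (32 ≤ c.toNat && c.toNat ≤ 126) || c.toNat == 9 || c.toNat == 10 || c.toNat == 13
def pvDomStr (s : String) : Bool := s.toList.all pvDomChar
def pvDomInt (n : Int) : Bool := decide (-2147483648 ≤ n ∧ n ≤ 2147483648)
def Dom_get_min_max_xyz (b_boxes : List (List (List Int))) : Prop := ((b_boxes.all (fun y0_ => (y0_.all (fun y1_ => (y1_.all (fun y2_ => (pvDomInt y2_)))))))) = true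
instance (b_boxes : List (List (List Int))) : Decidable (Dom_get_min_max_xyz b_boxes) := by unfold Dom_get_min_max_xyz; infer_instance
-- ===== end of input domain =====

-- B replaces A's six-accumulator nested comparison loop by flatten-then-project-then-min/max (idiomatic decomposition, same cost).


-- ===== PORT A =====
-- one loop iteration of A's nested for: update the six running extrema from vertex v
def stepA (st : Int × Int × Int × Int × Int × Int) (v : List Int) : Int × Int × Int × Int × Int × Int :=
  let (mnx, mxx, mny, mxy, mnz, mxz) := st
  let mnx := if PySem.List.pyGetD v 0 0 < mnx then PySem.List.pyGetD v 0 0 else mnx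
  let mxx := if PySem.List.pyGetD v 0 0 > mxx then PySem.List.pyGetD v 0 0 else mxx
  let mny := if PySem.List.pyGetD v 1 0 < mny then PySem.List.pyGetD v 1 0 else mny
  let mxy := if PySem.List.pyGetD v 1 0 > mxy then PySem.List.pyGetD v 1 0 else mxy
  let mnz := if PySem.List.pyGetD v 2 0 < mnz then PySem.List.pyGetD v 2 0 else mnz
  let mxz := if PySem.List.pyGetD v 2 0 > mxz then PySem.List.pyGetD v 2 0 else mxz
  (mnx, mxx, mny, mxy, mnz, mxz)

def get_min_max_xyz (b_boxes : List (List (List Int))) : List Int :=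
  let v := PySem.List.pyGetD (PySem.List.pyGetD b_boxes 0 []) 0 []
  let init : Int × Int × Int × Int × Int × Int :=
    (PySem.List.pyGetD v 0 0, PySem.List.pyGetD v 0 0, PySem.List.pyGetD v 1 0,
     PySem.List.pyGetD v 1 0, PySem.List.pyGetD v 2 0, PySem.List.pyGetD v 2 0)
  let r := b_boxes.foldl (fun st b => b.foldl stepA st) init
  [r.1, r.2.1, r.2.2.1, r.2.2.2.1, r.2.2.2.2.1, r.2.2.2.2.2]

-- ===== PORT B =====
def get_min_max_xyz_alt (b_boxes : List (List (List Int))) : List Int :=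
  let verts := b_boxes.flatMap (fun b => b)
  let xs := verts.map (fun v => PySem.List.pyGetD v 0 0)
  let ys := verts.map (fun v => PySem.List.pyGetD v 1 0)
  let zs := verts.map (fun v => PySem.List.pyGetD v 2 0)
  [(PySem.List.min? xs (fun x => x)).getD 0, (PySem.List.max? xs (fun x => x)).getD 0,
   (PySem.List.min? ys (fun x => x)).getD 0, (PySem.List.max? ys (fun x => x)).getD 0,
   (PySem.List.min? zs (fun x => x)).getD 0, (PySem.List.max? zs (fun x => x)).getD 0]

-- ===== PRECONDITION & SPEC =====
-- A raises IndexError unless b_boxes and its first box are nonempty and every vertex has at least 3 coordinates.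
def Pre_get_min_max_xyz (b_boxes : List (List (List Int))) : Prop :=
  b_boxes ≠ [] ∧ b_boxes.headD [] ≠ [] ∧ ∀ b ∈ b_boxes, ∀ v ∈ b, 3 ≤ v.length
instance (b_boxes : List (List (List Int))) : Decidable (Pre_get_min_max_xyz b_boxes) := by
  unfold Pre_get_min_max_xyz; infer_instance
def pvWitness_get_min_max_xyz : List (List (List Int)) := [[[0, 1, 2]]]

def Spec_get_min_max_xyz (b_boxes : List (List (List Int))) (out : List Int) : Prop := out = get_min_max_xyz_alt b_boxes
instance (b_boxes : List (List (List Int))) (out : List Int) : Decidable (Spec_get_min_max_xyz b_boxes out) := by unfold Spec_get_min_max_xyz; infer_instance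

-- ===== CLAIM (what is proved, stated in full; the proofs are below) =====
def Claim_equal_get_min_max_xyz : Prop := ∀ (b_boxes : List (List (List Int))), Dom_get_min_max_xyz b_boxes → Pre_get_min_max_xyz b_boxes → Spec_get_min_max_xyz b_boxes (get_min_max_xyz b_boxes)
-- ===== LEMMAS AND PROOFS =====

-- the nested box/vertex loop is a single fold over the flattened vertex list
lemma foldl_nested_flatMap {α β : Type} (l : List (List α)) (f : β → α → β) (i : β) :
    l.foldl (fun acc xs => xs.foldl f acc) i = (l.flatMap (fun b => b)).foldl f i := by
  induction l generalizing i with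
  | nil => rfl
  | cons x t ih => simp [List.foldl_append, ih]

-- A's six-tuple fold splits into six independent min/max folds over the projections
lemma stepA_fold (t : List (List Int)) (a b c d e f : Int) :
    t.foldl stepA (a, b, c, d, e, f) =
      ((t.map (fun v => PySem.List.pyGetD v 0 0)).foldl min a,
       (t.map (fun v => PySem.List.pyGetD v 0 0)).foldl max b,
       (t.map (fun v => PySem.List.pyGetD v 1 0)).foldl min c,
       (t.map (fun v => PySem.List.pyGetD v 1 0)).foldl max d,
       (t.map (fun v => PySem.List.pyGetD v 2 0)).foldl min e,
       (t.map (fun v => PySem.List.pyGetD v 2 0)).foldl max f) := by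
  induction t generalizing a b c d e f with
  | nil => rfl
  | cons v t ih =>
    have hmin : ∀ (m x : Int), (if x < m then x else m) = min m x := by
      intro m x; rw [min_def]; split_ifs <;> omega
    have hmax : ∀ (m x : Int), (if x > m then x else m) = max m x := by
      intro m x; rw [max_def]; split_ifs <;> omega
    simp only [List.foldl_cons, List.map_cons, stepA, hmin, hmax, ih]

theorem get_min_max_xyz_spec : Claim_equal_get_min_max_xyz := by
  intro bb _ hpre
  obtain ⟨h1, h2, _⟩ := hpre
  cases bb with
  | nil => exact absurd rfl h1
  | cons b1 rest =>
    cases b1 with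
    | nil => simp at h2
    | cons v0 vs =>
      unfold Spec_get_min_max_xyz get_min_max_xyz get_min_max_xyz_alt
      dsimp only
      rw [foldl_nested_flatMap]
      simp only [PySem.List.pyGetD_zero_cons, List.flatMap_cons, List.cons_append, stepA_fold]
      simp only [List.map_cons, List.foldl_cons, PySem.List.min?_id_cons,
        PySem.List.max?_id_cons, Option.getD_some, min_self, max_self]
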